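-- pv_equiv track=rewrite | github.com/sewerai-org/yatzy-kata | python/categories.py | get_highest_pair
-- ===== SOURCE A (Python) =====
-- from collections import namedtuple
-- from typing import Dict, Tuple, Union
--
-- DieNamedTuple = namedtuple('die', ['value', 'index'])
--
-- def get_highest_pair(
--         dice_tuple: Union[Tuple[int, int, int], Tuple[int, int, int, int, int]]
-- ) -> Tuple[DieNamedTuple, DieNamedTuple]:
--     """
--
--     :param dice_tuple: tuple of either 3 or 5 integers
--     :return: Tuple representing the value and index of the highest pair in dice_tuple
--     """
--
--     # if there are no pairs, return 0
--     default_return_value = (DieNamedTuple(value=0, index=-1), DieNamedTuple(value=0, index=-1))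
--
--     for possible_die_value in list(reversed(range(1, 7))):
--         for idx, actual_die_value_i in enumerate(dice_tuple[:-1]):
--             if actual_die_value_i == possible_die_value:
--                 for j, actual_die_value_j in enumerate(dice_tuple[idx + 1:]):
--                     jdx = j + idx + 1
--                     if actual_die_value_i == actual_die_value_j:
--                         return (DieNamedTuple(value=actual_die_value_i, index=idx),
--                                 DieNamedTuple(value=actual_die_value_j, index=jdx))
--
--     return default_return_value
-- ===== SOURCE B (Python) =====
-- from collections import namedtuple
--
-- DieNamedTuple = namedtuple('die', ['value', 'index'])
--
-- def get_highest_pair(dice_tuple):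
--     groups = {}
--     for i, v in enumerate(dice_tuple):
--         groups.setdefault(v, []).append(i)
--     for value in range(6, 0, -1):
--         idxs = groups.get(value, [])
--         if len(idxs) >= 2:
--             return (DieNamedTuple(value=value, index=idxs[0]),
--                     DieNamedTuple(value=value, index=idxs[1]))
--     return (DieNamedTuple(value=0, index=-1), DieNamedTuple(value=0, index=-1))
-- ===== Notes on version B (the rewrite author's own statement) =====
-- stated objective: simpler
-- what changed: Replaces A's triply-nested value/index/later-index scan by a single pass that groups indices by die value in a dict, then one descending loop 6..1 returning the first two indices of the first value occurring at least twice.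
import Mathlib
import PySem

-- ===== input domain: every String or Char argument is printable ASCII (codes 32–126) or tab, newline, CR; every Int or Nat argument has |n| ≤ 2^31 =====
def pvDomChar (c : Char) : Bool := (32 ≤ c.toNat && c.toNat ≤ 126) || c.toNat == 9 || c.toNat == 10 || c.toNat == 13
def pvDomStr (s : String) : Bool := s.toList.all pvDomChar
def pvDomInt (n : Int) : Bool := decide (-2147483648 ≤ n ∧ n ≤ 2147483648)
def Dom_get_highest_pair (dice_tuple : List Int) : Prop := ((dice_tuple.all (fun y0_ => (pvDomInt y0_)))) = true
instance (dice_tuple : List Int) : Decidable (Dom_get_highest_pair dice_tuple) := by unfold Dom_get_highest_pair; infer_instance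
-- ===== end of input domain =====

-- B replaces A's triply-nested value/index/later-index scan by one grouping pass (value → indices)
-- followed by a single descending loop over the values 6..1 (objective: simpler).

-- ===== PORT A =====
-- inner loop: 'for j, actual_die_value_j in enumerate(dice_tuple[idx + 1:]): …'
def aInnerLoop (vi idx : Int) : List (Int × Int) → Option ((Int × Int) × (Int × Int))
  | [] => none
  | (j, a) :: rest =>
    if vi == a then some ((vi, idx), (a, j + idx + 1)) else aInnerLoop vi idx rest

-- middle loop: 'for idx, actual_die_value_i in enumerate(dice_tuple[:-1]): …'
def aMidLoop (dice_tuple : List Int) (v : Int) : List (Int × Int) → Option ((Int × Int) × (Int × Int))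
  | [] => none
  | (idx, a) :: rest =>
    if a == v then
      match aInnerLoop a idx (PySem.List.enumerate (PySem.List.slice dice_tuple (some (idx + 1)) none) 0) with
      | some r => some r
      | none => aMidLoop dice_tuple v rest
    else aMidLoop dice_tuple v rest

-- outer loop: 'for possible_die_value in list(reversed(range(1, 7))): …'
def aOuterLoop (dice_tuple : List Int) : List Int → Option ((Int × Int) × (Int × Int))
  | [] => none
  | v :: vs =>
    match aMidLoop dice_tuple v (PySem.List.enumerate (PySem.List.slice dice_tuple none (some (-1))) 0) with
    | some r => some r
    | none => aOuterLoop dice_tuple vs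

def get_highest_pair (dice_tuple : List Int) : (Int × Int) × (Int × Int) :=
  (aOuterLoop dice_tuple (PySem.List.pyRange 1 7 1).reverse).getD ((0, -1), (0, -1))

-- ===== PORT B =====
-- 'for i, v in enumerate(dice_tuple): groups.setdefault(v, []).append(i)'
def bGroups (dice_tuple : List Int) : PySem.Dict Int (List Int) :=
  (PySem.List.enumerate dice_tuple 0).foldl (fun d p => d.modify p.2 [] (· ++ [p.1])) PySem.Dict.empty

-- 'for value in range(6, 0, -1): …'; idxs[0]/idxs[1] are in range by the guard len(idxs) >= 2
def bLoop (groups : PySem.Dict Int (List Int)) : List Int → (Int × Int) × (Int × Int)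
  | [] => ((0, -1), (0, -1))
  | v :: vs =>
    let idxs := groups.getD v []
    if 2 ≤ idxs.length then
      ((v, PySem.List.pyGetD idxs 0 0), (v, PySem.List.pyGetD idxs 1 0))
    else bLoop groups vs

def get_highest_pair_alt (dice_tuple : List Int) : (Int × Int) × (Int × Int) :=
  bLoop (bGroups dice_tuple) (PySem.List.pyRange 6 0 (-1))

-- ===== PRECONDITION & SPEC =====
def Spec_get_highest_pair (dice_tuple : List Int) (out : (Int × Int) × (Int × Int)) : Prop := out = get_highest_pair_alt dice_tuple
instance (dice_tuple : List Int) (out : (Int × Int) × (Int × Int)) : Decidable (Spec_get_highest_pair dice_tuple out) := by unfold Spec_get_highest_pair; infer_instance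

-- ===== CLAIM (what is proved, stated in full; the proofs are below) =====
def Claim_equal_get_highest_pair : Prop := ∀ (dice_tuple : List Int), Dom_get_highest_pair dice_tuple → Spec_get_highest_pair dice_tuple (get_highest_pair dice_tuple)

-- ===== LEMMAS AND PROOFS =====

-- indices (in enumerated form) at which the value v occurs
def occ (v : Int) (l : List (Int × Int)) : List Int := (l.filter (fun p => p.2 == v)).map (·.1)

theorem occ_nil (v : Int) : occ v [] = [] := rfl

theorem occ_cons (v : Int) (p : Int × Int) (l : List (Int × Int)) :
    occ v (p :: l) = if p.2 == v then p.1 :: occ v l else occ v l := by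
  simp [occ, List.filter_cons]; split <;> simp

theorem inner_eq (v idx : Int) (l : List Int) : ∀ (s : Int),
    aInnerLoop v idx (PySem.List.enumerate l s) =
      (occ v (PySem.List.enumerate l (s + idx + 1))).head?.map (fun j => ((v, idx), (v, j))) := by
  induction l with
  | nil => intro s; simp [aInnerLoop, PySem.List.enumerate_nil, occ_nil]
  | cons a t ih =>
    intro s
    rw [PySem.List.enumerate_cons, PySem.List.enumerate_cons]
    by_cases h : v = a
    · subst h; simp [aInnerLoop, occ_cons]
    · have h' : ¬ a = v := fun hh => h hh.symm
      simp only [aInnerLoop, occ_cons, beq_iff_eq, h, h', if_false]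
      rw [ih (s + 1)]
      ring_nf

theorem mid_eq (dice : List Int) (v : Int) :
    ∀ (n k : Nat), dice.length - k ≤ n →
    aMidLoop dice v (PySem.List.enumerate (dice.dropLast.drop k) (k : Int)) =
      (match occ v (PySem.List.enumerate (dice.drop k) (k : Int)) with
       | i0 :: i1 :: _ => some ((v, i0), (v, i1))
       | _ => none) := by
  intro n
  induction n with
  | zero =>
    intro k hk
    have h1 : dice.length ≤ k := by omega
    have h2 : dice.dropLast.length ≤ k := by simp [List.length_dropLast]; omega
    rw [List.drop_eq_nil_of_le h1, List.drop_eq_nil_of_le h2]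
    simp [aMidLoop, PySem.List.enumerate_nil, occ_nil]
  | succ n ih =>
    intro k hk
    by_cases hlt : k + 1 < dice.length
    · -- the element at k is in dropLast
      have hk1 : k < dice.dropLast.length := by simp [List.length_dropLast]; omega
      have hkd : k < dice.length := by omega
      have hcast : ((k : Int) + 1) = ((k + 1 : Nat) : Int) := by push_cast; ring
      have hslice : PySem.List.slice dice (some ((k : Int) + 1)) none = dice.drop (k + 1) := by
        rw [hcast, PySem.List.slice_from_natCast]
      have hih := ih (k + 1) (by omega)
      rw [← hcast] at hih
      rw [List.drop_eq_getElem_cons hk1, List.drop_eq_getElem_cons hkd,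
          PySem.List.enumerate_cons, PySem.List.enumerate_cons, List.getElem_dropLast]
      by_cases h : dice[k] = v
      · have hb : (dice[k] == v) = true := by simp [h]
        simp only [aMidLoop, occ_cons, hb, if_true]
        rw [hslice, h, inner_eq]
        simp only [zero_add]
        cases hocc : occ v (PySem.List.enumerate (List.drop (k + 1) dice) ((k : Int) + 1)) with
        | nil =>
          rw [hocc] at hih
          simp only [List.head?_nil, Option.map_none]
          simpa using hih
        | cons i1 t =>
          simp
      · have hb : (dice[k] == v) = false := by simp [h]
        simp only [aMidLoop, occ_cons, hb, Bool.false_eq_true, if_false]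
        exact hih
    · -- k is the last index or past the end: the middle loop scans the empty list
      have h2 : dice.dropLast.length ≤ k := by simp [List.length_dropLast]; omega
      rw [List.drop_eq_nil_of_le h2]
      simp only [aMidLoop, PySem.List.enumerate_nil]
      by_cases hkd : k < dice.length
      · rw [List.drop_eq_getElem_cons hkd, List.drop_eq_nil_of_le (by omega),
            PySem.List.enumerate_cons, PySem.List.enumerate_nil, occ_cons]
        by_cases h : dice[k] = v <;> simp [h, occ_nil]
      · rw [List.drop_eq_nil_of_le (by omega)]
        simp [PySem.List.enumerate_nil, occ_nil]

theorem groups_getD (dice : List Int) (v : Int) :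
    (bGroups dice).getD v [] = occ v (PySem.List.enumerate dice 0) := by
  have h := PySem.Dict.getD_foldl_modify_append
      ((PySem.List.enumerate dice 0).map (fun p => (p.2, p.1)))
      (PySem.Dict.empty : PySem.Dict Int (List Int)) v
  rw [List.foldl_map] at h
  unfold bGroups occ
  rw [h]
  simp [List.filter_map, List.map_map, Function.comp_def]

theorem outer_eq (dice : List Int) : ∀ (L : List Int),
    (aOuterLoop dice L).getD ((0, -1), (0, -1)) = bLoop (bGroups dice) L := by
  intro L
  induction L with
  | nil => simp [aOuterLoop, bLoop]
  | cons v vs ih =>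
    have hmid : aMidLoop dice v (PySem.List.enumerate (PySem.List.slice dice none (some (-1))) 0) =
        (match occ v (PySem.List.enumerate dice 0) with
         | i0 :: i1 :: _ => some ((v, i0), (v, i1))
         | _ => none) := by
      rw [PySem.List.slice_to_neg_one]
      have h := mid_eq dice v dice.length 0 (by omega)
      simpa using h
    simp only [aOuterLoop, bLoop, hmid, groups_getD]
    cases hocc : occ v (PySem.List.enumerate dice 0) with
    | nil => simpa using ih
    | cons i0 t =>
      cases t with
      | nil => simpa using ih
      | cons i1 t' => simp [PySem.List.pyGetD_ofNat']

-- ===== VERDICT (by name: the statement is the Claim_ definition above) =====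
theorem get_highest_pair_spec : Claim_equal_get_highest_pair := by
  intro dice _
  unfold Spec_get_highest_pair get_highest_pair get_highest_pair_alt
  rw [PySem.List.pyRange_neg_one_eq_reverse]
  norm_num
  exact outer_eq dice _
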